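-- pv_equiv track=rewrite | github.com/aver1001/Problem-Solving | 풀이 완료/13549/acmicpc.py | DP
-- ===== SOURCE A (Python) =====
-- from collections import deque
--
-- def DP(start, end):
--     table = [-1]*(100001)
--
--     queue = deque([[start, 0]])
--     while queue:
--         nowLoc, nowCost = queue.popleft()
--         if table[nowLoc] > nowCost or table[nowLoc] == -1:
--             table[nowLoc] = nowCost
--         else:
--             continue
--
--         for nextLoc, nextCost in [[nowLoc*2, nowCost], [nowLoc+1, nowCost+1], [nowLoc-1, nowCost+1]]:
--
--             if 0 <= nextLoc < (100001) and (table[nextLoc] > nextCost or table[nextLoc] == -1):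
--                 queue.append([nextLoc, nextCost])
--     return table[end]
-- ===== SOURCE B (Python) =====
-- def DP(start, end):
--     # Top-down recursion on the target: cost to reach n from start is
--     # start - n for n <= start; otherwise walk up (n - start), or reach
--     # n//2 (resp. n//2 and n//2 + 1 for odd n) and use the free doubling
--     # plus at most one unit step.  No table, no queue.
--     def g(n):
--         if n <= start:
--             return start - n
--         if n == 1:
--             return 1
--         if n % 2 == 0:
--             return min(n - start, g(n // 2))
--         return min(n - start, g(n // 2) + 1, g(n // 2 + 1) + 1)
--     return g(end)
-- ===== Notes on version B (the rewrite author's own statement) =====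
-- stated objective: faster
-- what changed: Replaces the SPFA-style queue relaxation over a 100001-entry table with a direct top-down recursion on the target (halve the target, pay one for a parity step, or walk the remaining distance), so no table and no queue are built.
-- outside the precondition, e.g. on DP(-5, 3): A returns -1, B returns 2; on DP(3, -5): A returns 5, B returns 8; on DP(-1, 7): A returns 3, B returns 2
import Mathlib
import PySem

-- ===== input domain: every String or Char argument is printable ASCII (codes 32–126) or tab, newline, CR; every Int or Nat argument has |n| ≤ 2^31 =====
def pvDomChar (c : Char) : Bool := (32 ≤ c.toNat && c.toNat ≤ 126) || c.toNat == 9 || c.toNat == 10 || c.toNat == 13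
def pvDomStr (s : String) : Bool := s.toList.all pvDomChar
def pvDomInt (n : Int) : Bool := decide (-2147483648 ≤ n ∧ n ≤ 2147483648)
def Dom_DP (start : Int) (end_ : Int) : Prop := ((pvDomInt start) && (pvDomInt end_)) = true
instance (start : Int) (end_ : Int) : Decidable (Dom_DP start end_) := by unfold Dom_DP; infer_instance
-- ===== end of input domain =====

-- B replaces A's SPFA-style queue relaxation over a 100001-entry table by a
-- direct top-down recursion on the target (halve it, pay 1 for a parity step,
-- or walk the remaining distance); measured asymptotically faster.

-- ===== PORT A =====
-- A: SPFA-style relaxation: a FIFO queue (collections.deque) of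
-- [location, cost] pairs; a popped pair is accepted iff it improves
-- table[loc]; accepted pops re-push all three neighbours that look improving.

-- two-list deque (Python collections.deque restricted to the operations A uses)
structure PVDeque (α : Type) where
  front : List α
  back : List α

def PVDeque.pop? {α : Type} (q : PVDeque α) : Option (α × PVDeque α) :=
  match q.front with
  | x :: f => some (x, ⟨f, q.back⟩)
  | [] =>
    match q.back.reverse with
    | [] => none
    | x :: f => some (x, ⟨f, []⟩)

def PVDeque.pushBack {α : Type} (q : PVDeque α) (a : α) : PVDeque α := ⟨q.front, a :: q.back⟩
def PVDeque.list {α : Type} (q : PVDeque α) : List α := q.front ++ q.back.reverse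
def PVDeque.len {α : Type} (q : PVDeque α) : Nat := q.front.length + q.back.length

theorem PVDeque.pop?_some {α : Type} {q : PVDeque α} {x : α} {q' : PVDeque α}
    (h : q.pop? = some (x, q')) : q.list = x :: q'.list ∧ q.len = q'.len + 1 := by
  rcases q with ⟨f, b⟩
  cases f with
  | nil =>
    cases hb : b.reverse with
    | nil => simp [PVDeque.pop?, hb] at h
    | cons y f' =>
      simp [PVDeque.pop?, hb] at h
      obtain ⟨hx, hq⟩ := h
      subst hx; subst hq
      constructor
      · simp [PVDeque.list, hb]
      · have := congrArg List.length hb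
        simp at this
        simp [PVDeque.len, this]
  | cons y f =>
    simp [PVDeque.pop?] at h
    obtain ⟨hx, hq⟩ := h
    subst hx; subst hq
    constructor
    · simp [PVDeque.list]
    · simp [PVDeque.len]; omega

-- Python list indexing (wraparound for negative indices)
def pvWrap (i : Int) (n : Nat) : Nat := if i < 0 then (i + n).toNat else i.toNat
-- table[i] read / write; exact for -n ≤ i < n (OOB would raise, excluded by Pre_)
def tGet (t : Array Int) (i : Int) : Int := t.getD (pvWrap i t.size) 0
def tSet (t : Array Int) (i : Int) (x : Int) : Array Int := t.setIfInBounds (pvWrap i t.size) x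

-- termination measure for A's loop: (#unset entries, total of set entries, queue length)
def encN (x : Int) : Nat := if x < 0 then 1 else 0
def cntNeg (t : Array Int) : Nat := ∑ i ∈ Finset.range t.size, encN (t.getD i 0)
def sumPos (t : Array Int) : Nat := ∑ i ∈ Finset.range t.size, (t.getD i 0).toNat

theorem getD_setIfInBounds (t : Array Int) (j : Nat) (w : Int) (i : Nat) (hi : i < t.size) :
    (t.setIfInBounds j w).getD i 0 = if j = i then w else t.getD i 0 := by
  rw [Array.getD_eq_getD_getElem?, Array.getD_eq_getD_getElem?]
  rw [Array.getElem?_setIfInBounds]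
  by_cases h : j = i
  · subst h; simp [hi]
  · simp [h, hi]

theorem measure_set {t : Array Int} {j : Nat} (hj : j < t.size) {w : Int} (hw : 0 ≤ w)
    (hold : t.getD j 0 = -1 ∨ w < t.getD j 0) :
    cntNeg (t.setIfInBounds j w) < cntNeg t ∨
      (cntNeg (t.setIfInBounds j w) = cntNeg t ∧ sumPos (t.setIfInBounds j w) < sumPos t) := by
  have hsz : (t.setIfInBounds j w).size = t.size := by simp
  have hget := getD_setIfInBounds t j w
  rcases hold with hold | hold
  · left
    unfold cntNeg
    rw [hsz]
    apply Finset.sum_lt_sum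
    · intro i hi
      rw [Finset.mem_range] at hi
      rw [hget i hi]
      by_cases h : j = i
      · subst h
        generalize t.getD j 0 = A at hold ⊢
        subst hold
        unfold encN
        split_ifs <;> omega
      · simp [h]
    · refine ⟨j, Finset.mem_range.mpr hj, ?_⟩
      rw [hget j hj]
      generalize t.getD j 0 = A at hold ⊢
      subst hold
      unfold encN
      split_ifs <;> omega
  · right
    constructor
    · unfold cntNeg
      rw [hsz]
      apply Finset.sum_congr rfl
      intro i hi
      rw [Finset.mem_range] at hi
      rw [hget i hi]
      by_cases h : j = i
      · subst h
        generalize t.getD j 0 = A at hold ⊢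
        unfold encN
        split_ifs <;> omega
      · simp [h]
    · unfold sumPos
      rw [hsz]
      apply Finset.sum_lt_sum
      · intro i hi
        rw [Finset.mem_range] at hi
        rw [hget i hi]
        by_cases h : j = i
        · subst h
          generalize t.getD j 0 = A at hold ⊢
          split <;> omega
        · simp [h]
      · refine ⟨j, Finset.mem_range.mpr hj, ?_⟩
        rw [hget j hj]
        generalize t.getD j 0 = A at hold ⊢
        split <;> omega

theorem measure_tSet {t : Array Int} {i : Int} {w : Int} (hw : 0 ≤ w)
    (hold : tGet t i = -1 ∨ w < tGet t i) :
    cntNeg (tSet t i w) < cntNeg t ∨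
      (cntNeg (tSet t i w) = cntNeg t ∧ sumPos (tSet t i w) < sumPos t) := by
  have hj : pvWrap i t.size < t.size := by
    by_contra hout
    rw [not_lt] at hout
    have : tGet t i = 0 := by
      simp [tGet, Array.getD]
      omega
    rw [this] at hold
    omega
  have : tGet t i = t.getD (pvWrap i t.size) 0 := rfl
  rw [this] at hold
  exact measure_set hj hw hold

-- the inner for-loop's push condition (abbrev so the `if` finds decidability)
abbrev pushCondA (t : Array Int) (p : Int × Nat) : Prop :=
  0 ≤ p.1 ∧ p.1 < 100001 ∧ (tGet t p.1 > (p.2 : Int) ∨ tGet t p.1 = -1)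

def pushA (t : Array Int) (q : PVDeque (Int × Nat)) (l : List (Int × Nat)) : PVDeque (Int × Nat) :=
  l.foldl (fun q p => if pushCondA t p then q.pushBack p else q) q

def loopA (t : Array Int) (q : PVDeque (Int × Nat)) : Array Int :=
  match hp : q.pop? with
  | none => t
  | some (p, q') =>
    if hacc : tGet t p.1 > (p.2 : Int) ∨ tGet t p.1 = -1 then
      loopA (tSet t p.1 (p.2 : Int))
        (pushA (tSet t p.1 (p.2 : Int)) q'
          [(2 * p.1, p.2), (p.1 + 1, p.2 + 1), (p.1 - 1, p.2 + 1)])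
    else loopA t q'
  termination_by (cntNeg t, sumPos t, q.len)
  decreasing_by
  · have hm := measure_tSet (w := ((p.2 : Int))) (t := t) (i := p.1)
      (by exact_mod_cast Int.natCast_nonneg p.2) (Or.symm hacc)
    rcases hm with h | ⟨h1, h2⟩
    · exact Prod.Lex.left _ _ h
    · rw [h1]
      exact Prod.Lex.right _ (Prod.Lex.left _ _ h2)
  · have := (PVDeque.pop?_some hp).2
    exact Prod.Lex.right _ (Prod.Lex.right _ (by omega))

def DP (start : Int) (end_ : Int) : Int :=
  tGet (loopA (Array.replicate 100001 (-1)) ⟨[(start, 0)], []⟩) end_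

-- ===== PORT B =====
-- B: recursion on the target n (Source B's inner g): cost is start - n below
-- start; above it, either walk up directly or reach n//2 (n//2 and n//2+1
-- for odd n) and use the free doubling plus at most one unit step.
-- `1` at n ≤ 1: Source B's `n == 1` base case; the n = 0 leg of the guard is a
-- totalisation guard (Python reaches g(0) with 0 > start only when start < 0,
-- where its recursion diverges; excluded by Pre_).
def gB (s : Int) (n : Nat) : Int :=
  if (n : Int) ≤ s then s - (n : Int)
  else if n ≤ 1 then 1
  else if n % 2 = 0 then min ((n : Int) - s) (gB s (n / 2))
  else min ((n : Int) - s) (min (gB s (n / 2) + 1) (gB s (n / 2 + 1) + 1))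
termination_by n
decreasing_by all_goals omega

-- Source B recurses on the Python int `end` directly; `.toNat` is exact on Pre_ (0 ≤ end_)
def DP_alt (start : Int) (end_ : Int) : Int := gB start end_.toNat

-- ===== PRECONDITION & SPEC =====
-- Pre_ restricts to the task's natural domain 0 ≤ start, end ≤ 100000: outside
-- it A either raises IndexError (|start| or |end| > 100001) or returns values
-- produced by Python's negative-index wraparound into the table (an artifact of
-- the list representation), which B's arithmetic recursion has no list to mimic.
def Pre_DP (start : Int) (end_ : Int) : Prop :=
  (0 ≤ start ∧ start ≤ 100000) ∧ (0 ≤ end_ ∧ end_ ≤ 100000)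

instance (start : Int) (end_ : Int) : Decidable (Pre_DP start end_) := by
  unfold Pre_DP; infer_instance

def pvWitness_DP : Int × Int := (3, 17)

def Spec_DP (start : Int) (end_ : Int) (out : Int) : Prop := out = DP_alt start end_
instance (start : Int) (end_ : Int) (out : Int) : Decidable (Spec_DP start end_ out) := by
  unfold Spec_DP; infer_instance

-- ===== CLAIM (what is proved, stated in full; the proofs are below) =====
def Claim_equal_DP : Prop :=
  ∀ (start : Int) (end_ : Int), Dom_DP start end_ → Pre_DP start end_ →
    Spec_DP start end_ (DP start end_)

-- ===== LEMMAS AND PROOFS =====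

theorem PVDeque.pop?_none {α : Type} {q : PVDeque α} (h : q.pop? = none) : q.list = [] := by
  rcases q with ⟨f, b⟩
  cases f with
  | nil =>
    cases hb : b.reverse with
    | nil => simp [PVDeque.list, hb]
    | cons x f' => simp [PVDeque.pop?, hb] at h
  | cons x f => simp [PVDeque.pop?] at h

theorem PVDeque.list_pushBack {α : Type} (q : PVDeque α) (a : α) :
    (q.pushBack a).list = q.list ++ [a] := by
  rcases q with ⟨f, b⟩; simp [PVDeque.pushBack, PVDeque.list]

-- ---- the underlying graph: nodes 0..100000, edges v->2v (cost 0), v->v±1 (cost 1) ----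
def edgeG (u v c : Nat) : Prop :=
  u ≤ 100000 ∧ v ≤ 100000 ∧
    ((v = 2 * u ∧ c = 0) ∨ (v = u + 1 ∧ c = 1) ∨ (u = v + 1 ∧ c = 1))

inductive CostW (s : Nat) : Nat → Nat → Prop
  | refl : CostW s s 0
  | step {u k v c} : CostW s u k → edgeG u v c → CostW s v (k + c)

noncomputable def distSP (s v : Nat) : Nat := sInf {k | CostW s v k}

theorem distSP_le {s v k : Nat} (h : CostW s v k) : distSP s v ≤ k := Nat.sInf_le h

theorem distSP_mem {s v : Nat} (h : ∃ k, CostW s v k) : CostW s v (distSP s v) :=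
  Nat.sInf_mem h

-- exact-cost straight walks
theorem CostW_up (s : Nat) (_hs : s ≤ 100000) :
    ∀ d, s + d ≤ 100000 → CostW s (s + d) d := by
  intro d
  induction d with
  | zero => intro _; exact CostW.refl
  | succ n ih =>
    intro h
    exact CostW.step (ih (by omega)) ⟨by omega, by omega, Or.inr (Or.inl ⟨by omega, rfl⟩)⟩

theorem CostW_down (s : Nat) (hs : s ≤ 100000) :
    ∀ d, d ≤ s → CostW s (s - d) d := by
  intro d
  induction d with
  | zero => intro _; exact CostW.refl
  | succ n ih =>
    intro h
    exact CostW.step (ih (by omega)) ⟨by omega, by omega, Or.inr (Or.inr ⟨by omega, rfl⟩)⟩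

theorem reach (s v : Nat) (hs : s ≤ 100000) (hv : v ≤ 100000) : ∃ k, CostW s v k := by
  rcases Nat.le_total s v with h | h
  · refine ⟨v - s, ?_⟩
    have := CostW_up s hs (v - s) (by omega)
    rwa [show s + (v - s) = v by omega] at this
  · refine ⟨s - v, ?_⟩
    have := CostW_down s hs (s - v) (by omega)
    rwa [show s - (s - v) = v by omega] at this

-- ---- abstract view of a distance table ----
def valA (t : Array Int) (v : Nat) : Int := t.getD v 0

-- the characterisation A's final table satisfies
def FinalS (s : Nat) (t : Array Int) : Prop :=
  t.size = 100001 ∧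
  (∀ v, v ≤ 100000 → valA t v = -1 ∨ ∃ k, CostW s v k ∧ valA t v = (k : Int)) ∧
  (∀ u v c, edgeG u v c → ∀ k : Nat, valA t u = (k : Int) →
      ∃ m : Nat, valA t v = (m : Int) ∧ m ≤ k + c) ∧
  valA t s = 0

theorem final_dist (s : Nat) (hs : s ≤ 100000) (t : Array Int) (hf : FinalS s t) :
    ∀ v, v ≤ 100000 → valA t v = ((distSP s v : Nat) : Int) := by
  obtain ⟨hsz, hsound, hstab, hstart⟩ := hf
  have ub : ∀ {v k : Nat}, CostW s v k → ∃ m : Nat, valA t v = (m : Int) ∧ m ≤ k := by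
    intro v k h
    induction h with
    | refl => exact ⟨0, by simpa using hstart, le_refl 0⟩
    | step hc he ih =>
      obtain ⟨m, hm, hmle⟩ := ih
      obtain ⟨m', hm', hle'⟩ := hstab _ _ _ he m hm
      exact ⟨m', hm', by omega⟩
  intro v hv
  obtain ⟨m, hm, hmle⟩ := ub (distSP_mem (reach s v hs hv))
  rcases hsound v hv with hnone | ⟨k, hk, hval⟩
  · rw [hnone] at hm; omega
  · have h1 : distSP s v ≤ k := distSP_le hk
    have h2 : (m : Int) = (k : Int) := by rw [← hm, ← hval]
    have h3 : m = k := by exact_mod_cast h2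
    have h4 : m = distSP s v := by omega
    rw [hm, h4]

-- ---- small value/index bookkeeping lemmas ----
theorem pvWrap_natCast (v n : Nat) : pvWrap (v : Int) n = v := by
  simp [pvWrap]

theorem tGet_natCast (t : Array Int) (v : Nat) : tGet t (v : Int) = t.getD v 0 := by
  rw [tGet, pvWrap_natCast]

theorem valA_set (t : Array Int) (j : Nat) (x : Int) (i : Nat) (hi : i < t.size) :
    valA (t.setIfInBounds j x) i = if j = i then x else valA t i :=
  getD_setIfInBounds t j x i hi

theorem valA_replicate (v : Nat) (hv : v < 100001) :
    valA (Array.replicate 100001 (-1 : Int)) v = -1 := by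
  rw [valA, Array.getD_eq_getD_getElem?]
  simp [hv]

-- ---- membership in the queue produced by A's push loop ----
theorem pushA_mem (t : Array Int) (l : List (Int × Nat)) :
    ∀ (q : PVDeque (Int × Nat)) (x : Int × Nat),
      x ∈ (pushA t q l).list ↔ x ∈ q.list ∨ (x ∈ l ∧ pushCondA t x) := by
  induction l with
  | nil => intro q x; simp [pushA]
  | cons a l ih =>
    intro q x
    by_cases h : pushCondA t a
    · rw [show pushA t q (a :: l) = pushA t (q.pushBack a) l from by
        unfold pushA; rw [List.foldl_cons, if_pos h]]
      rw [ih, PVDeque.list_pushBack, List.mem_append, List.mem_singleton]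
      constructor
      · rintro ((hx | rfl) | hx)
        · exact Or.inl hx
        · exact Or.inr ⟨by simp, h⟩
        · exact Or.inr ⟨List.mem_cons_of_mem _ hx.1, hx.2⟩
      · rintro (hx | ⟨hm, hc⟩)
        · exact Or.inl (Or.inl hx)
        · rcases List.mem_cons.mp hm with rfl | hm
          · exact Or.inl (Or.inr rfl)
          · exact Or.inr ⟨hm, hc⟩
    · rw [show pushA t q (a :: l) = pushA t q l from by
        unfold pushA; rw [List.foldl_cons, if_neg h]]
      rw [ih]
      constructor
      · rintro (hx | ⟨hm, hc⟩)
        · exact Or.inl hx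
        · exact Or.inr ⟨List.mem_cons_of_mem _ hm, hc⟩
      · rintro (hx | ⟨hm, hc⟩)
        · exact Or.inl hx
        · rcases List.mem_cons.mp hm with rfl | hm
          · exact absurd hc h
          · exact Or.inr ⟨hm, hc⟩

-- ---- A's loop invariant ----
def InvA (s : Nat) (t : Array Int) (q : PVDeque (Int × Nat)) : Prop :=
  t.size = 100001 ∧
  (∀ v, v ≤ 100000 → valA t v = -1 ∨ ∃ k, CostW s v k ∧ valA t v = (k : Int)) ∧
  (∀ p ∈ q.list, ∃ v : Nat, p.1 = (v : Int) ∧ v ≤ 100000 ∧ CostW s v p.2) ∧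
  (∀ u v c, edgeG u v c → ∀ k : Nat, valA t u = (k : Int) →
      (∃ m : Nat, valA t v = (m : Int) ∧ m ≤ k + c) ∨
        (∃ c' : Nat, ((v : Int), c') ∈ q.list ∧ c' ≤ k + c)) ∧
  (valA t s = 0 ∨ ((s : Int), (0 : Nat)) ∈ q.list)

theorem loopA_final (s : Nat) (hs : s ≤ 100000) :
    ∀ t q, InvA s t q → FinalS s (loopA t q) := by
  intro t q
  fun_induction loopA t q with
  | case1 t q hp =>
    rintro ⟨hsz, hsound, hq, hstab, hstart⟩
    have hnil := PVDeque.pop?_none hp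
    refine ⟨hsz, hsound, ?_, ?_⟩
    · intro u v c he k hk
      rcases hstab u v c he k hk with hb | ⟨c', hc', -⟩
      · exact hb
      · rw [hnil] at hc'; simp at hc'
    · rcases hstart with h | h
      · exact h
      · rw [hnil] at h; simp at h
  | case2 t q p q' hp hacc ih =>
    rintro ⟨hsz, hsound, hq, hstab, hstart⟩
    obtain ⟨hql, -⟩ := PVDeque.pop?_some hp
    obtain ⟨v₀, hp1, hv₀, hcost⟩ := hq p (by rw [hql]; simp)
    have hts : tSet t p.1 (p.2 : Int) = t.setIfInBounds v₀ (p.2 : Int) := by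
      rw [hp1, tSet, hsz, pvWrap_natCast]
    have hsz' : (tSet t p.1 (p.2 : Int)).size = 100001 := by rw [hts]; simp [hsz]
    have hval : ∀ i, i ≤ 100000 →
        valA (tSet t p.1 (p.2 : Int)) i = if i = v₀ then (p.2 : Int) else valA t i := by
      intro i hi
      rw [hts, valA_set t v₀ _ i (by omega)]
      by_cases h : i = v₀
      · rw [if_pos h.symm, if_pos h]
      · rw [if_neg (fun hh => h hh.symm), if_neg h]
    have htg : tGet t p.1 = valA t v₀ := by rw [hp1, tGet_natCast]; rfl
    have haccv := hacc
    rw [htg] at haccv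
    apply ih
    show InvA s (tSet t p.1 (p.2 : Int))
      (pushA (tSet t p.1 (p.2 : Int)) q' [(2 * p.1, p.2), (p.1 + 1, p.2 + 1), (p.1 - 1, p.2 + 1)])
    refine ⟨hsz', ?_, ?_, ?_, ?_⟩
    · -- sound
      intro v hv
      by_cases h : v = v₀
      · right; rw [hval v hv, if_pos h, h]; exact ⟨p.2, hcost, rfl⟩
      · rw [hval v hv, if_neg h]; exact hsound v hv
    · -- queue sound
      intro x hx
      rcases (pushA_mem _ _ _ _).mp hx with hx | ⟨hm, hc⟩
      · exact hq x (by rw [hql]; exact List.mem_cons_of_mem _ hx)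
      · obtain ⟨hc1, hc2, -⟩ := hc
        rcases List.mem_cons.mp hm with rfl | hm
        · -- (2*p.1, p.2)
          have hb : 2 * v₀ ≤ 100000 := by
            have : (2 : Int) * p.1 < 100001 := hc2
            rw [hp1] at this; omega
          refine ⟨2 * v₀, by rw [hp1]; push_cast; ring, hb, ?_⟩
          have := CostW.step hcost (⟨hv₀, hb, Or.inl ⟨rfl, rfl⟩⟩ : edgeG v₀ (2 * v₀) 0)
          simpa using this
        rcases List.mem_cons.mp hm with rfl | hm
        · -- (p.1 + 1, p.2 + 1)
          have hb : v₀ + 1 ≤ 100000 := by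
            have : p.1 + 1 < 100001 := hc2
            rw [hp1] at this; omega
          refine ⟨v₀ + 1, by rw [hp1]; push_cast; ring, hb, ?_⟩
          exact CostW.step hcost ⟨hv₀, hb, Or.inr (Or.inl ⟨rfl, rfl⟩)⟩
        rcases List.mem_cons.mp hm with rfl | hm
        · -- (p.1 - 1, p.2 + 1)
          have hge : 1 ≤ v₀ := by
            have : (0 : Int) ≤ p.1 - 1 := hc1
            rw [hp1] at this; omega
          refine ⟨v₀ - 1, by rw [hp1]; omega, by omega, ?_⟩
          exact CostW.step hcost ⟨hv₀, by omega, Or.inr (Or.inr ⟨by omega, rfl⟩)⟩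
        simp at hm
    · -- stability
      intro u v c he k hk
      have hu100 := he.1
      have hv100 := he.2.1
      by_cases hu : u = v₀
      · subst hu
        have hkp : k = p.2 := by
          rw [hval u hu100, if_pos rfl] at hk
          exact_mod_cast hk.symm
        -- the matching push candidate
        have hcand : ∃ ent ∈ [(2 * p.1, p.2), (p.1 + 1, p.2 + 1), (p.1 - 1, p.2 + 1)],
            ent = ((v : Int), k + c) := by
          rcases he.2.2 with ⟨hv1, hc1⟩ | ⟨hv1, hc1⟩ | ⟨hv1, hc1⟩
          · exact ⟨(2 * p.1, p.2), by simp, by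
              rw [Prod.mk.injEq]; exact ⟨by rw [hp1]; omega, by omega⟩⟩
          · exact ⟨(p.1 + 1, p.2 + 1), by simp, by
              rw [Prod.mk.injEq]; exact ⟨by rw [hp1]; omega, by omega⟩⟩
          · exact ⟨(p.1 - 1, p.2 + 1), by simp, by
              rw [Prod.mk.injEq]; exact ⟨by rw [hp1]; omega, by omega⟩⟩
        obtain ⟨ent, hment, hpair⟩ := hcand
        by_cases hcnd : pushCondA (tSet t p.1 (p.2 : Int)) ent
        · right
          refine ⟨k + c, ?_, le_refl _⟩
          exact (pushA_mem _ _ _ _).mpr (Or.inr ⟨hpair ▸ hment, hpair ▸ hcnd⟩)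
        · left
          have htg2 : tGet (tSet t p.1 (p.2 : Int)) ((v : Int)) =
              valA (tSet t p.1 (p.2 : Int)) v := by rw [tGet_natCast]; rfl
          have hnc : ¬(valA (tSet t p.1 (p.2 : Int)) v > ((k + c : Nat) : Int) ∨
              valA (tSet t p.1 (p.2 : Int)) v = -1) := by
            intro hcc
            apply hcnd
            rw [hpair]
            refine ⟨by omega, by omega, ?_⟩
            simpa [htg2] using hcc
          by_cases h : v = u
          · refine ⟨p.2, by rw [hval v hv100, if_pos h], ?_⟩
            have hvv := hval v hv100
            rw [if_pos h] at hvv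
            rw [hvv] at hnc
            omega
          · rcases hsound v hv100 with hn | ⟨k', hk', hvk⟩
            · exfalso; apply hnc; right; rw [hval v hv100, if_neg h]; exact hn
            · refine ⟨k', by rw [hval v hv100, if_neg h]; exact hvk, ?_⟩
              have : ¬(valA t v > ((k + c : Nat) : Int)) := by
                intro hgt; apply hnc; left; rw [hval v hv100, if_neg h]; exact hgt
              rw [hvk] at this; omega
      · -- u untouched
        have hku : valA t u = (k : Int) := by
          rw [hval u hu100, if_neg hu] at hk; exact hk
        rcases hstab u v c he k hku with ⟨m, hm, hmle⟩ | ⟨c', hc', hcle⟩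
        · by_cases hv' : v = v₀
          · left
            refine ⟨p.2, by rw [hval v hv100, if_pos hv'], ?_⟩
            rcases haccv with hlt | hneg
            · rw [hv'] at hm; rw [hm] at hlt
              have : p.2 < m := by exact_mod_cast hlt
              omega
            · rw [hv'] at hm; rw [hm] at hneg; omega
          · left; exact ⟨m, by rw [hval v hv100, if_neg hv']; exact hm, hmle⟩
        · rw [hql] at hc'
          rcases List.mem_cons.mp hc' with heq | hm'
          · left
            have h1 := congrArg Prod.fst heq
            have h2 := congrArg Prod.snd heq
            simp only at h1 h2
            have hvv : v = v₀ := by rw [hp1] at h1; exact_mod_cast h1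
            refine ⟨p.2, by rw [hval v hv100, if_pos hvv], by omega⟩
          · exact Or.inr ⟨c', (pushA_mem _ _ _ _).mpr (Or.inl hm'), hcle⟩
    · -- start
      rcases hstart with h0 | hm
      · left
        by_cases hsv : s = v₀
        · exfalso
          rw [hsv] at h0
          rcases haccv with hlt | hneg
          · rw [h0] at hlt; omega
          · rw [h0] at hneg; omega
        · rw [hval s hs, if_neg hsv]; exact h0
      · rw [hql] at hm
        rcases List.mem_cons.mp hm with heq | hm'
        · left
          have h1 := congrArg Prod.fst heq
          have h2 := congrArg Prod.snd heq
          simp only at h1 h2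
          have hsv : s = v₀ := by rw [hp1] at h1; exact_mod_cast h1
          rw [hval s hs, if_pos hsv, ← h2]
          simp
        · exact Or.inr ((pushA_mem _ _ _ _).mpr (Or.inl hm'))
  | case3 t q p q' hp hacc ih =>
    rintro ⟨hsz, hsound, hq, hstab, hstart⟩
    obtain ⟨hql, -⟩ := PVDeque.pop?_some hp
    obtain ⟨v₀, hp1, hv₀, hcost⟩ := hq p (by rw [hql]; simp)
    have htg : tGet t p.1 = valA t v₀ := by rw [hp1, tGet_natCast]; rfl
    have hnacc := hacc
    rw [htg] at hnacc
    have hle : valA t v₀ ≤ (p.2 : Int) ∧ valA t v₀ ≠ -1 := by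
      constructor
      · by_contra hlt
        exact hnacc (Or.inl (by omega))
      · intro h
        exact hnacc (Or.inr h)
    apply ih
    refine ⟨hsz, hsound, ?_, ?_, ?_⟩
    · intro x hx
      exact hq x (by rw [hql]; exact List.mem_cons_of_mem _ hx)
    · intro u v c he k hk
      rcases hstab u v c he k hk with hb | ⟨c', hc', hcle⟩
      · exact Or.inl hb
      · rw [hql] at hc'
        rcases List.mem_cons.mp hc' with heq | hm'
        · left
          have h1 := congrArg Prod.fst heq
          have h2 := congrArg Prod.snd heq
          simp only at h1 h2
          have hvv : v = v₀ := by rw [hp1] at h1; exact_mod_cast h1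
          rcases hsound v he.2.1 with hn | ⟨k', hk', hvk⟩
          · rw [hvv] at hn; exact absurd hn hle.2
          · refine ⟨k', hvk, ?_⟩
            have hv2 := hle.1
            rw [← hvv, hvk] at hv2
            have : k' ≤ p.2 := by exact_mod_cast hv2
            omega
        · exact Or.inr ⟨c', hm', hcle⟩
    · rcases hstart with h0 | hm
      · exact Or.inl h0
      · rw [hql] at hm
        rcases List.mem_cons.mp hm with heq | hm'
        · left
          have h1 := congrArg Prod.fst heq
          have h2 := congrArg Prod.snd heq
          simp only at h1 h2
          have hsv : s = v₀ := by rw [hp1] at h1; exact_mod_cast h1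
          rcases hsound s hs with hn | ⟨k', hk', hvk⟩
          · rw [hsv] at hn; exact absurd hn hle.2
          · rw [hvk]
            have hv2 := hle.1
            rw [← hsv, hvk] at hv2
            omega
        · exact Or.inr hm'

-- ---- A's initial state ----
theorem invA_init (s : Nat) (hs : s ≤ 100000) :
    InvA s (Array.replicate 100001 (-1)) ⟨[((s : Int), (0 : Nat))], []⟩ := by
  have hlist : (⟨[((s : Int), (0 : Nat))], []⟩ : PVDeque (Int × Nat)).list =
      [((s : Int), (0 : Nat))] := rfl
  refine ⟨by simp, ?_, ?_, ?_, ?_⟩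
  · intro v hv
    left
    exact valA_replicate v (by omega)
  · intro p hp
    rw [hlist] at hp
    rcases List.mem_singleton.mp hp with rfl
    exact ⟨s, rfl, hs, CostW.refl⟩
  · intro u v c he k hk
    exfalso
    rw [valA_replicate u (by have := he.1; omega)] at hk
    omega
  · right
    rw [hlist]
    exact List.mem_singleton.mpr rfl

-- ---- final reads ----
theorem tGet_final (t : Array Int) (hsz : t.size = 100001) (e : Nat) :
    tGet t (e : Int) = valA t e := by
  rw [tGet, hsz, pvWrap_natCast]; rfl

-- ---- B-side lemmas: unfolding equations for gB ----
theorem gB_case_base {s : Int} {n : Nat} (h : (n : Int) ≤ s) : gB s n = s - (n : Int) := by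
  rw [gB.eq_def]; simp [h]

theorem gB_case_one {s : Int} {n : Nat} (h : ¬ (n : Int) ≤ s) (h1 : n ≤ 1) : gB s n = 1 := by
  rw [gB.eq_def]; simp [h, h1]

theorem gB_case_even {s : Int} {n : Nat} (h : ¬ (n : Int) ≤ s) (h1 : ¬ n ≤ 1) (h2 : n % 2 = 0) :
    gB s n = min ((n : Int) - s) (gB s (n / 2)) := by
  rw [gB.eq_def]; simp [h, h1, h2]

theorem gB_case_odd {s : Int} {n : Nat} (h : ¬ (n : Int) ≤ s) (h1 : ¬ n ≤ 1) (h2 : n % 2 = 1) :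
    gB s n = min ((n : Int) - s) (min (gB s (n / 2) + 1) (gB s (n / 2 + 1) + 1)) := by
  rw [gB.eq_def]; simp [h, h1, h2]

theorem gB_nonneg (s : Int) (n : Nat) : 0 ≤ gB s n := by
  fun_induction gB s n with
  | case1 h => omega
  | case2 => omega
  | case3 h h1 h2 ih => simp only [le_min_iff]; omega
  | case4 h h1 h2 ih1 ih2 => simp only [le_min_iff]; omega

-- gB is 1-Lipschitz in the target: both ±1 edges cost at most 1
theorem gB_lip (s : Int) (hs : 0 ≤ s) :
    ∀ n : Nat, gB s (n + 1) ≤ gB s n + 1 ∧ gB s n ≤ gB s (n + 1) + 1 := by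
  intro n
  induction n using Nat.strong_induction_on with
  | _ n ih =>
  by_cases hb : ((n + 1 : Nat) : Int) ≤ s
  · have hbn : ((n : Nat) : Int) ≤ s := by push_cast at hb ⊢; omega
    rw [gB_case_base hb, gB_case_base hbn]
    push_cast
    omega
  · by_cases hbn : ((n : Nat) : Int) ≤ s
    · -- s = n exactly
      have hsn : s = (n : Int) := by push_cast at hb; omega
      rw [gB_case_base hbn]
      have hnn := gB_nonneg s (n + 1)
      have hup : gB s (n + 1) ≤ 1 := by
        by_cases h1 : n + 1 ≤ 1
        · rw [gB_case_one hb h1]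
        · by_cases h2 : (n + 1) % 2 = 0
          · rw [gB_case_even hb h1 h2]
            push_cast
            omega
          · rw [gB_case_odd hb h1 (by omega)]
            omega
      omega
    · have hpos : 1 ≤ n := by
        by_contra h
        exact hbn (by omega)
      by_cases h1 : n ≤ 1
      · -- n = 1, hence s = 0
        have hn1 : n = 1 := by omega
        subst hn1
        have hs0 : s = 0 := by push_cast at hbn; omega
        subst hs0
        rw [gB_case_one hbn h1,
          gB_case_even hb (by omega) (by omega)]
        have e : (1 + 1) / 2 = 1 := by norm_num
        rw [e, gB_case_one hbn h1]
        push_cast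
        omega
      · by_cases h2 : n % 2 = 0
        · -- n even, n + 1 odd
          have hA := gB_case_even hbn h1 h2
          have hB := gB_case_odd hb (by omega) (by omega)
          have e1 : (n + 1) / 2 = n / 2 := by omega
          rw [e1] at hB
          obtain ⟨ih1, ih2⟩ := ih (n / 2) (by omega)
          rw [hA, hB]
          push_cast
          omega
        · -- n odd, n + 1 even
          have hA := gB_case_odd hbn h1 (by omega)
          have hB := gB_case_even hb (by omega) (by omega)
          have e1 : (n + 1) / 2 = n / 2 + 1 := by omega
          rw [e1] at hB
          obtain ⟨ih1, ih2⟩ := ih (n / 2) (by omega)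
          rw [hA, hB]
          push_cast
          omega

-- the free doubling edge never increases gB
theorem gB_double (s : Int) (hs : 0 ≤ s) (u : Nat) : gB s (2 * u) ≤ gB s u := by
  by_cases hb : ((2 * u : Nat) : Int) ≤ s
  · rw [gB_case_base hb]
    by_cases hbu : ((u : Nat) : Int) ≤ s
    · rw [gB_case_base hbu]
      push_cast
      omega
    · exfalso
      push_cast at hb hbu
      omega
  · have hu1 : 1 ≤ u := by
      by_contra h
      exact hb (by push_cast; omega)
    rw [gB_case_even hb (by omega) (by omega), show 2 * u / 2 = u by omega]
    exact min_le_right _ _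

-- lower bound: gB is at most the cost of any walk
theorem gB_le_cost (sN : Nat) {v k : Nat} (h : CostW sN v k) :
    gB (sN : Int) v ≤ (k : Int) := by
  induction h with
  | refl =>
    rw [gB_case_base (le_refl _)]
    simp
  | @step u k v c hc he ih =>
    have hs0 : (0 : Int) ≤ (sN : Int) := by positivity
    rcases he.2.2 with ⟨hv, hc0⟩ | ⟨hv, hc1⟩ | ⟨hv, hc1⟩
    · subst hv; subst hc0
      have := gB_double (sN : Int) hs0 u
      push_cast
      omega
    · subst hv; subst hc1
      have := (gB_lip (sN : Int) hs0 u).1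
      push_cast
      omega
    · subst hc1
      subst hv
      have := (gB_lip (sN : Int) hs0 v).2
      push_cast
      omega

-- upper bound: gB is realised by a walk inside the board
theorem cost_gB (sN : Nat) (hsb : sN ≤ 100000) :
    ∀ n : Nat, n ≤ 100000 → CostW sN n (gB (sN : Int) n).toNat := by
  intro n
  induction n using Nat.strong_induction_on with
  | _ n ih =>
  intro hn
  by_cases hb : ((n : Nat) : Int) ≤ (sN : Int)
  · have hns : n ≤ sN := by exact_mod_cast hb
    rw [gB_case_base hb, show ((sN : Int) - (n : Int)).toNat = sN - n by omega]
    have := CostW_down sN hsb (sN - n) (by omega)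
    rwa [show sN - (sN - n) = n by omega] at this
  · have hlt : sN < n := by push_cast at hb; omega
    by_cases h1 : n ≤ 1
    · have hn1 : n = 1 := by omega
      have hs0 : sN = 0 := by omega
      subst hn1; subst hs0
      rw [gB_case_one hb h1]
      exact CostW.step CostW.refl ⟨by omega, by omega, Or.inr (Or.inl ⟨rfl, rfl⟩)⟩
    · have hA0 := gB_nonneg (sN : Int) (n / 2)
      by_cases h2 : n % 2 = 0
      · rw [gB_case_even hb h1 h2]
        rcases le_total ((n : Int) - (sN : Int)) (gB (sN : Int) (n / 2)) with hle | hle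
        · rw [show (min ((n : Int) - (sN : Int)) (gB (sN : Int) (n / 2))).toNat = n - sN by
            omega]
          have := CostW_up sN hsb (n - sN) (by omega)
          rwa [show sN + (n - sN) = n by omega] at this
        · rw [show (min ((n : Int) - (sN : Int)) (gB (sN : Int) (n / 2))).toNat =
              (gB (sN : Int) (n / 2)).toNat by omega]
          have hstep := CostW.step (ih (n / 2) (by omega) (by omega))
            (⟨by omega, by omega, Or.inl ⟨rfl, rfl⟩⟩ : edgeG (n / 2) (2 * (n / 2)) 0)
          rwa [show 2 * (n / 2) = n by omega] at hstep
      · have hB0 := gB_nonneg (sN : Int) (n / 2 + 1)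
        rw [gB_case_odd hb h1 (by omega)]
        set A := gB (sN : Int) (n / 2) with hAdef
        set B := gB (sN : Int) (n / 2 + 1) with hBdef
        rcases le_total ((n : Int) - (sN : Int)) (min (A + 1) (B + 1)) with hle | hle
        · rw [show (min ((n : Int) - (sN : Int)) (min (A + 1) (B + 1))).toNat = n - sN by
            omega]
          have := CostW_up sN hsb (n - sN) (by omega)
          rwa [show sN + (n - sN) = n by omega] at this
        · rcases le_total A B with hab | hab
          · rw [show (min ((n : Int) - (sN : Int)) (min (A + 1) (B + 1))).toNat =
                A.toNat + 0 + 1 by omega]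
            have hhalf := ih (n / 2) (by omega) (by omega)
            have hstep := CostW.step hhalf
              (⟨by omega, by omega, Or.inl ⟨rfl, rfl⟩⟩ : edgeG (n / 2) (2 * (n / 2)) 0)
            exact CostW.step hstep
              ⟨by omega, by omega, Or.inr (Or.inl ⟨by omega, rfl⟩)⟩
          · rw [show (min ((n : Int) - (sN : Int)) (min (A + 1) (B + 1))).toNat =
                B.toNat + 0 + 1 by omega]
            have hhalf := ih (n / 2 + 1) (by omega) (by omega)
            have hstep := CostW.step hhalf
              (⟨by omega, by omega, Or.inl ⟨rfl, rfl⟩⟩ :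
                edgeG (n / 2 + 1) (2 * (n / 2 + 1)) 0)
            exact CostW.step hstep
              ⟨by omega, by omega, Or.inr (Or.inr ⟨by omega, rfl⟩)⟩

theorem gB_eq_dist (sN : Nat) (hsb : sN ≤ 100000) (n : Nat) (hn : n ≤ 100000) :
    gB (sN : Int) n = ((distSP sN n : Nat) : Int) := by
  have h1 : distSP sN n ≤ (gB (sN : Int) n).toNat := distSP_le (cost_gB sN hsb n hn)
  have h2 : gB (sN : Int) n ≤ ((distSP sN n : Nat) : Int) :=
    gB_le_cost sN (distSP_mem (reach sN n hsb hn))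
  have h0 := gB_nonneg (sN : Int) n
  omega

-- ===== VERDICT (by name: the statement is the Claim_ definition above) =====
theorem DP_spec : Claim_equal_DP := by
  intro start end_ hdom hpre
  obtain ⟨⟨hs0, hs1⟩, ⟨he0, he1⟩⟩ := hpre
  unfold Spec_DP DP DP_alt
  have hsx : start = ((start.toNat : Nat) : Int) := by omega
  have hex : end_ = ((end_.toNat : Nat) : Int) := by omega
  have hsb : start.toNat ≤ 100000 := by omega
  have heb : end_.toNat ≤ 100000 := by omega
  rw [hsx, hex]
  simp only [Int.toNat_natCast]
  have hA := loopA_final start.toNat hsb _ _ (invA_init start.toNat hsb)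
  rw [tGet_final _ hA.1, final_dist _ hsb _ hA _ heb, gB_eq_dist start.toNat hsb _ heb]
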